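-- pv_equiv track=rewrite | github.com/bepnye/tf_ner | data/data_utils.py | generate_seqs
-- ===== SOURCE A (Python) =====
-- def generate_seqs(words, tags, terminal_words = ['', '.', '?', '!'], keep_terminal = True):
--   word_seqs = []
--   tag_seqs = []
--
--   cur_word_seq = []
--   cur_tag_seq = []
--
--   def push_seq():
--     if len(cur_word_seq) > 0:
--       word_seqs.append(tuple(cur_word_seq))
--       tag_seqs.append(tuple(cur_tag_seq))
--       cur_word_seq.clear()
--       cur_tag_seq.clear()
--     else:
--       pass # don't push empty seqs
--
--   for word, tag in zip(words, tags):
--     if word in terminal_words: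
--       if keep_terminal:
--         cur_word_seq.append(word)
--         cur_tag_seq.append(tag)
--       push_seq()
--     else:
--       cur_word_seq.append(word)
--       cur_tag_seq.append(tag)
--   push_seq() # push final seq in case file doesn't end with a blank line
--
--   return word_seqs, tag_seqs
-- ===== SOURCE B (Python) =====
-- def generate_seqs(words, tags, terminal_words = ['', '.', '?', '!'], keep_terminal = True):
--   pairs = list(zip(words, tags))
--   bounds = [i for i, (w, _) in enumerate(pairs) if w in terminal_words]
--   segs = []
--   start = 0
--   for i in bounds:
--     stop = i + 1 if keep_terminal else i
--     seg = pairs[start:stop]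
--     if seg:
--       segs.append(seg)
--     start = i + 1
--   tail = pairs[start:]
--   if tail:
--     segs.append(tail)
--   return [tuple(w for w, _ in s) for s in segs], [tuple(t for _, t in s) for s in segs]
-- ===== Notes on version B (the rewrite author's own statement) =====
-- stated objective: alternative
-- what changed: B first zips words/tags into pairs and computes the list of terminal boundary indices, then walks a start pointer over those boundaries taking slices pairs[start:stop], instead of A's single accumulate-and-flush loop with mutable current buffers and a nested push_seq closure.
import Mathlib
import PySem

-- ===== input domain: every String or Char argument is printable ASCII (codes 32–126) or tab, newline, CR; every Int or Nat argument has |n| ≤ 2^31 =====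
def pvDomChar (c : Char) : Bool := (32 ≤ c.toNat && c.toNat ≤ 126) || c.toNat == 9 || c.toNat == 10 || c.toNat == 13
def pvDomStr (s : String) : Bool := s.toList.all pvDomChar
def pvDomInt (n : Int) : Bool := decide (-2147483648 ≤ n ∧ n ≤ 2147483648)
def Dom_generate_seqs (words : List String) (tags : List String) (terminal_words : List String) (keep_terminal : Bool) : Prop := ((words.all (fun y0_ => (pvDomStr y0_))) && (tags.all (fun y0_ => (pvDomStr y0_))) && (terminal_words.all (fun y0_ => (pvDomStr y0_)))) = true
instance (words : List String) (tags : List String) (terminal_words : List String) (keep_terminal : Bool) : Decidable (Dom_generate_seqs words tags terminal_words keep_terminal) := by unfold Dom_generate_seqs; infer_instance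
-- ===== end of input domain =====

-- B segments the zipped pairs by precomputed boundary indices and slices,
-- instead of A's accumulate-and-flush loop; a different decomposition, same cost.

-- ===== PORT A =====
-- state = (word_seqs, tag_seqs, cur_word_seq, cur_tag_seq)
abbrev PVStA := List (List String) × List (List String) × List String × List String

-- push_seq: only a non-empty current sequence is pushed, then the buffers are cleared
def pushA (st : PVStA) : PVStA :=
  if st.2.2.1 ≠ [] then (st.1 ++ [st.2.2.1], st.2.1 ++ [st.2.2.2], [], []) else st

-- body of A's for-loop over zip(words, tags)
def stepA (terms : List String) (kt : Bool) (st : PVStA) (p : String × String) : PVStA :=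
  if terms.contains p.1 then
    if kt then pushA (st.1, st.2.1, st.2.2.1 ++ [p.1], st.2.2.2 ++ [p.2])
    else pushA st
  else (st.1, st.2.1, st.2.2.1 ++ [p.1], st.2.2.2 ++ [p.2])

def generate_seqs (words : List String) (tags : List String) (terminal_words : List String) (keep_terminal : Bool) : List (List String) × List (List String) :=
  let fin := pushA ((List.zip words tags).foldl (stepA terminal_words keep_terminal) ([], [], [], []))
  (fin.1, fin.2.1)

-- ===== PORT B =====
-- bounds = [i for i, (w, _) in enumerate(pairs) if w in terminal_words], carrying the running index k
def boundsFrom (terms : List String) (k : Nat) : List (String × String) → List Nat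
  | [] => []
  | p :: r => if terms.contains p.1 then k :: boundsFrom terms (k + 1) r else boundsFrom terms (k + 1) r

-- the start-pointer walk over the boundary indices; the Python slice pairs[start:stop]
-- is ported as (drop start).take (stop - start), exact here since 0 ≤ start ≤ stop in every slice taken
def segsB (pairs : List (String × String)) (kt : Bool) : Nat → List Nat → List (List (String × String))
  | start, [] =>
      let tail := pairs.drop start
      if tail.isEmpty then [] else [tail]
  | start, i :: bs =>
      let stop := if kt then i + 1 else i
      let seg := (pairs.drop start).take (stop - start)
      (if seg.isEmpty then [] else [seg]) ++ segsB pairs kt (i + 1) bs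

def generate_seqs_alt (words : List String) (tags : List String) (terminal_words : List String) (keep_terminal : Bool) : List (List String) × List (List String) :=
  let pairs := List.zip words tags
  let segs := segsB pairs keep_terminal 0 (boundsFrom terminal_words 0 pairs)
  (segs.map (List.map Prod.fst), segs.map (List.map Prod.snd))

-- ===== PRECONDITION & SPEC =====
def Spec_generate_seqs (words : List String) (tags : List String) (terminal_words : List String) (keep_terminal : Bool) (out : List (List String) × List (List String)) : Prop := out = generate_seqs_alt words tags terminal_words keep_terminal
instance (words : List String) (tags : List String) (terminal_words : List String) (keep_terminal : Bool) (out : List (List String) × List (List String)) : Decidable (Spec_generate_seqs words tags terminal_words keep_terminal out) := by unfold Spec_generate_seqs; infer_instance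

-- ===== CLAIM (what is proved, stated in full; the proofs are below) =====
def Claim_equal_generate_seqs : Prop := ∀ (words : List String) (tags : List String) (terminal_words : List String) (keep_terminal : Bool), Dom_generate_seqs words tags terminal_words keep_terminal → Spec_generate_seqs words tags terminal_words keep_terminal (generate_seqs words tags terminal_words keep_terminal)

-- ===== LEMMAS AND PROOFS =====

-- A's and B's results as functions of the zipped pair list
def ARun (terms : List String) (kt : Bool) (pairs : List (String × String)) : List (List String) × List (List String) :=
  ((pushA (pairs.foldl (stepA terms kt) ([], [], [], []))).1,
   (pushA (pairs.foldl (stepA terms kt) ([], [], [], []))).2.1)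

def BRun (terms : List String) (kt : Bool) (pairs : List (String × String)) : List (List String) × List (List String) :=
  ((segsB pairs kt 0 (boundsFrom terms 0 pairs)).map (List.map Prod.fst),
   (segsB pairs kt 0 (boundsFrom terms 0 pairs)).map (List.map Prod.snd))

lemma pushA_shift (oW oT : List (List String)) (c d : List String) :
    pushA (oW, oT, c, d) =
      (oW ++ (pushA ([], [], c, d)).1, oT ++ (pushA ([], [], c, d)).2.1,
       (pushA ([], [], c, d)).2.2.1, (pushA ([], [], c, d)).2.2.2) := by
  by_cases hc : c = [] <;> simp [pushA, hc]

lemma stepA_shift (terms : List String) (kt : Bool) (oW oT : List (List String)) (c d : List String) (p : String × String) :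
    stepA terms kt (oW, oT, c, d) p =
      (oW ++ (stepA terms kt ([], [], c, d) p).1, oT ++ (stepA terms kt ([], [], c, d) p).2.1,
       (stepA terms kt ([], [], c, d) p).2.2.1, (stepA terms kt ([], [], c, d) p).2.2.2) := by
  simp only [stepA]
  split_ifs with h1 h2
  · exact pushA_shift oW oT (c ++ [p.1]) (d ++ [p.2])
  · exact pushA_shift oW oT c d
  · simp

-- a terminal-free prefix only extends the current buffers
lemma foldA_free (terms : List String) (kt : Bool) :
    ∀ (l : List (String × String)), (∀ p ∈ l, terms.contains p.1 = false) →
    ∀ (oW oT : List (List String)) (cW cT : List String),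
      l.foldl (stepA terms kt) (oW, oT, cW, cT) =
        (oW, oT, cW ++ l.map Prod.fst, cT ++ l.map Prod.snd) := by
  intro l
  induction l with
  | nil => intro _ oW oT cW cT; simp
  | cons p l ih =>
      intro hfree oW oT cW cT
      have hp : terms.contains p.1 = false := hfree p (by simp)
      simp only [List.foldl_cons, stepA, hp, Bool.false_eq_true, if_false]
      rw [ih (fun q hq => hfree q (by simp [hq]))]
      simp

-- the fold only appends to the output lists
lemma foldA_out (terms : List String) (kt : Bool) :
    ∀ (l : List (String × String)) (oW oT : List (List String)) (cW cT : List String),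
      l.foldl (stepA terms kt) (oW, oT, cW, cT) =
        (oW ++ (l.foldl (stepA terms kt) ([], [], cW, cT)).1,
         oT ++ (l.foldl (stepA terms kt) ([], [], cW, cT)).2.1,
         (l.foldl (stepA terms kt) ([], [], cW, cT)).2.2.1,
         (l.foldl (stepA terms kt) ([], [], cW, cT)).2.2.2) := by
  intro l
  induction l with
  | nil => intro oW oT cW cT; simp
  | cons p l ih =>
      intro oW oT cW cT
      simp only [List.foldl_cons]
      rw [stepA_shift]
      rw [ih (oW ++ (stepA terms kt ([], [], cW, cT) p).1) (oT ++ (stepA terms kt ([], [], cW, cT) p).2.1)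
            ((stepA terms kt ([], [], cW, cT) p).2.2.1) ((stepA terms kt ([], [], cW, cT) p).2.2.2)]
      conv_rhs =>
        rw [show stepA terms kt ([], [], cW, cT) p =
              ((stepA terms kt ([], [], cW, cT) p).1, (stepA terms kt ([], [], cW, cT) p).2.1,
               (stepA terms kt ([], [], cW, cT) p).2.2.1, (stepA terms kt ([], [], cW, cT) p).2.2.2) from rfl]
        rw [ih ((stepA terms kt ([], [], cW, cT) p).1) ((stepA terms kt ([], [], cW, cT) p).2.1)
              ((stepA terms kt ([], [], cW, cT) p).2.2.1) ((stepA terms kt ([], [], cW, cT) p).2.2.2)]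
      simp [List.append_assoc]

-- running the tail of A's loop with cleared buffers after pushed output (oW, oT)
lemma pushA_foldA_out (terms : List String) (kt : Bool) (rest : List (String × String))
    (oW oT : List (List String)) :
    (pushA (rest.foldl (stepA terms kt) (oW, oT, [], []))).1 = oW ++ (ARun terms kt rest).1 ∧
    (pushA (rest.foldl (stepA terms kt) (oW, oT, [], []))).2.1 = oT ++ (ARun terms kt rest).2 := by
  rw [foldA_out terms kt rest oW oT [] []]
  rw [pushA_shift]
  have hr : rest.foldl (stepA terms kt) ([], [], [], []) =
      ((rest.foldl (stepA terms kt) ([], [], [], [])).1, (rest.foldl (stepA terms kt) ([], [], [], [])).2.1,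
       (rest.foldl (stepA terms kt) ([], [], [], [])).2.2.1, (rest.foldl (stepA terms kt) ([], [], [], [])).2.2.2) := rfl
  constructor
  · show _ = oW ++ (pushA (rest.foldl (stepA terms kt) ([], [], [], []))).1
    conv_rhs => rw [hr, pushA_shift]
    simp [List.append_assoc]
  · show _ = oT ++ (pushA (rest.foldl (stepA terms kt) ([], [], [], []))).2.1
    conv_rhs => rw [hr, pushA_shift]
    simp [List.append_assoc]

lemma boundsFrom_add (terms : List String) :
    ∀ (l : List (String × String)) (j k : Nat),
      boundsFrom terms (j + k) l = (boundsFrom terms j l).map (· + k) := by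
  intro l
  induction l with
  | nil => intro j k; simp [boundsFrom]
  | cons p r ih =>
      intro j k
      by_cases hp : p.1 ∈ terms <;>
        simp [boundsFrom, hp, show j + k + 1 = (j + 1) + k by omega, ih (j + 1) k]

lemma boundsFrom_free_append (terms : List String) :
    ∀ (pre : List (String × String)), (∀ p ∈ pre, terms.contains p.1 = false) →
    ∀ (k : Nat) (l : List (String × String)),
      boundsFrom terms k (pre ++ l) = boundsFrom terms (k + pre.length) l := by
  intro pre
  induction pre with
  | nil => intro _ k l; simp [boundsFrom]
  | cons p r ih =>
      intro hfree k l
      have hp : terms.contains p.1 = false := hfree p (by simp)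
      simp only [List.cons_append, boundsFrom, hp, Bool.false_eq_true, if_false]
      rw [ih (fun q hq => hfree q (by simp [hq])) (k + 1) l]
      congr 1
      simp [List.length_cons]
      omega

lemma segsB_shift (kt : Bool) :
    ∀ (bs : List Nat) (pre rest : List (String × String)) (s : Nat),
      segsB (pre ++ rest) kt (pre.length + s) (bs.map (· + pre.length)) = segsB rest kt s bs := by
  intro bs
  induction bs with
  | nil =>
      intro pre rest s
      simp [segsB, List.drop_length_add_append]
  | cons i bs ih =>
      intro pre rest s
      simp only [List.map_cons, segsB]
      have hdrop : (pre ++ rest).drop (pre.length + s) = rest.drop s :=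
        List.drop_length_add_append s
      have hsub : (if kt then i + pre.length + 1 else i + pre.length) - (pre.length + s)
          = (if kt then i + 1 else i) - s := by
        cases kt <;> simp <;> omega
      rw [hdrop, hsub]
      congr 1
      have h1 : i + pre.length + 1 = pre.length + (i + 1) := by omega
      rw [h1, ← ih pre rest (i + 1)]

-- heads dropped by dropWhile fail the predicate
lemma dropWhile_head_false {α : Type} (p : α → Bool) :
    ∀ (l : List α) (x : α) (xs : List α), l.dropWhile p = x :: xs → p x = false := by
  intro l
  induction l with
  | nil => intro x xs h; simp [List.dropWhile] at h
  | cons a l ih =>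
      intro x xs h
      by_cases ha : p a
      · rw [List.dropWhile_cons_of_pos ha] at h
        exact ih x xs h
      · rw [List.dropWhile_cons_of_neg ha] at h
        obtain ⟨rfl, rfl⟩ := List.cons.inj h
        simpa using ha

lemma ARun_eq_BRun (terms : List String) (kt : Bool) :
    ∀ (n : Nat) (pairs : List (String × String)), pairs.length ≤ n →
      ARun terms kt pairs = BRun terms kt pairs := by
  intro n
  induction n with
  | zero =>
      intro pairs h
      have hnil : pairs = [] := List.length_eq_zero_iff.mp (Nat.le_zero.mp h)
      subst hnil
      simp [ARun, BRun, pushA, boundsFrom, segsB]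
  | succ n ih =>
      intro pairs hlen
      obtain ⟨pre, suf, hsplit, hfree, hcase⟩ :
          ∃ pre suf, pre ++ suf = pairs ∧ (∀ p ∈ pre, terms.contains p.1 = false) ∧
            pairs.dropWhile (fun p => !terms.contains p.1) = suf := by
        refine ⟨pairs.takeWhile (fun p => !terms.contains p.1),
                pairs.dropWhile (fun p => !terms.contains p.1),
                List.takeWhile_append_dropWhile, ?_, rfl⟩
        intro p hp
        have := List.mem_takeWhile_imp hp
        simpa using this
      cases hsuf : suf with
      | nil =>
          -- no terminal word in pairs: a single final segment if pairs is non-empty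
          subst hsuf
          rw [List.append_nil] at hsplit
          subst hsplit
          have hb : boundsFrom terms 0 pre = [] := by
            have h := boundsFrom_free_append terms pre hfree 0 []
            rw [List.append_nil] at h
            rw [h]
            rfl
          have hA : pre.foldl (stepA terms kt) ([], [], [], []) =
              ([], [], pre.map Prod.fst, pre.map Prod.snd) := by
            have := foldA_free terms kt pre hfree [] [] [] []
            simpa using this
          by_cases hp : pre = []
          · subst hp; simp [ARun, BRun, pushA, boundsFrom, segsB]
          · have hmap : pre.map Prod.fst ≠ [] := by simpa using hp
            rw [ARun, BRun, hb, hA]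
            simp only [segsB, List.drop_zero]
            rw [if_neg (by simpa [List.isEmpty_iff] using hp)]
            simp [pushA, hmap]
      | cons t rest =>
          subst hsuf
          subst hsplit
          have ht : terms.contains t.1 = true := by
            have := dropWhile_head_false (fun p => !terms.contains p.1) _ t rest hcase
            simpa using this
          have hlen' : rest.length ≤ n := by
            simp only [List.length_append, List.length_cons] at hlen
            omega
          -- the first segment B takes
          set seg : List (String × String) := if kt then pre ++ [t] else pre with hsegdef
          -- bounds of the whole list = first boundary :: shifted bounds of rest
          have hbounds : boundsFrom terms 0 (pre ++ t :: rest) =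
              pre.length :: (boundsFrom terms 0 rest).map (· + (pre.length + 1)) := by
            rw [boundsFrom_free_append terms pre hfree 0 (t :: rest)]
            simp only [Nat.zero_add, boundsFrom, ht, if_true]
            congr 1
            have := boundsFrom_add terms rest 0 (pre.length + 1)
            simpa using this
          -- B's tail walk over the shifted bounds is B's walk on rest
          have hBrec : segsB (pre ++ t :: rest) kt (pre.length + 1)
              ((boundsFrom terms 0 rest).map (· + (pre.length + 1))) =
              segsB rest kt 0 (boundsFrom terms 0 rest) := by
            have h0 := segsB_shift kt (boundsFrom terms 0 rest) (pre ++ [t]) rest 0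
            simp only [List.append_assoc, List.singleton_append, List.length_append,
              List.length_cons, List.length_nil, Nat.zero_add, Nat.add_zero] at h0
            exact h0
          -- B's first slice
          have hseg : ((pre ++ t :: rest).drop 0).take ((if kt then pre.length + 1 else pre.length) - 0)
              = seg := by
            rw [hsegdef]
            cases kt
            · simpa using List.take_left' (l₂ := t :: rest) (rfl : pre.length = pre.length)
            · simp only [List.drop_zero, Nat.sub_zero, if_true]
              rw [show pre ++ t :: rest = (pre ++ [t]) ++ rest by simp]
              exact List.take_left' (by simp)
          -- A up to and including t: first segment pushed, buffers cleared
          have hA1 : (pre ++ t :: rest).foldl (stepA terms kt) ([], [], [], []) =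
              rest.foldl (stepA terms kt)
                ((if seg.isEmpty then [] else [seg.map Prod.fst]),
                 (if seg.isEmpty then [] else [seg.map Prod.snd]), [], []) := by
            rw [List.foldl_append]
            rw [show pre.foldl (stepA terms kt) ([], [], [], []) =
                  ([], [], pre.map Prod.fst, pre.map Prod.snd) by
              simpa using foldA_free terms kt pre hfree [] [] [] []]
            simp only [List.foldl_cons]
            congr 1
            simp only [stepA, ht, if_true, hsegdef]
            cases kt
            · simp only [if_false, Bool.false_eq_true, pushA]
              by_cases hp : pre = []
              · subst hp; simp
              · have h1 : pre.map Prod.fst ≠ [] := by simpa using hp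
                simp [h1, hp, List.isEmpty_iff]
            · simp [pushA, List.isEmpty_iff]
          -- assemble both sides
          obtain ⟨e1, e2⟩ := pushA_foldA_out terms kt rest
            ((if seg.isEmpty then [] else [seg.map Prod.fst]))
            ((if seg.isEmpty then [] else [seg.map Prod.snd]))
          have hB : BRun terms kt (pre ++ t :: rest) =
              ((if seg.isEmpty then [] else [seg.map Prod.fst]) ++ (BRun terms kt rest).1,
               (if seg.isEmpty then [] else [seg.map Prod.snd]) ++ (BRun terms kt rest).2) := by
            simp only [BRun, hbounds, segsB, hseg, hBrec, List.map_append]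
            by_cases hE : seg.isEmpty <;> simp [hE]
          rw [hB]
          have hih := ih rest hlen'
          show (_, _) = _
          rw [ARun] at *
          rw [hA1, e1, e2, ← hih]

-- ===== VERDICT (by name: the statement is the Claim_ definition above) =====
theorem generate_seqs_spec : Claim_equal_generate_seqs := by
  intro words tags terminal_words keep_terminal _
  show generate_seqs words tags terminal_words keep_terminal = generate_seqs_alt words tags terminal_words keep_terminal
  have h := ARun_eq_BRun terminal_words keep_terminal (List.zip words tags).length (List.zip words tags) le_rfl
  simpa [generate_seqs, generate_seqs_alt, ARun, BRun] using h
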